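-- pv_equiv track=rewrite | github.com/shashanky1464sse-netizen/_backend_ | app/services/resume_service.py | bucket_skills
-- ===== SOURCE A (Python) =====
-- TECH_SKILLS_DB: dict[str, list[str]] = {
--     "languages": [
--         "Python", "Java", "Kotlin", "C++", "C#", "C",
--         "Go", "Rust", "Swift", "PHP", "Ruby",
--         "JavaScript", "TypeScript", "SQL", "R", "Scala",
--         "Bash", "Shell", "MATLAB",
--     ],
--     "web": [
--         "HTML", "CSS", "Tailwind", "Bootstrap",
--         "MERN Stack", "MEAN Stack", "LAMP Stack",
--         "REST API", "GraphQL", "WebSockets",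
--     ],
--     "backend": [
--         "Django", "Flask", "FastAPI", "Spring Boot",
--         "Express", "Node.js", "Laravel", "ASP.NET",
--         "FastAPI", "Gin", "Echo",
--     ],
--     "frontend": [
--         "React", "Angular", "Vue", "Next.js",
--         "Redux", "Tailwind CSS", "Material UI", "Chakra UI",
--     ],
--     "mobile": [
--         # iOS
--         "Swift", "SwiftUI", "UIKit", "Xcode", "Core Data",
--         "Auto Layout", "Storyboards", "TestFlight",
--         "App Store Connect", "WKWebView", "Combine",
--         # Android / Cross-platform
--         "Android", "Jetpack Compose", "Retrofit",
--         "Flutter", "React Native",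
--     ],
--     "database": [
--         "MySQL", "PostgreSQL", "MongoDB", "SQLite",
--         "Firebase", "Redis", "Oracle", "MSSQL",
--         "Cassandra", "DynamoDB", "Supabase",
--         "SQL Querying", "Database Management",
--     ],
--     "devops": [
--         "AWS", "Azure", "GCP", "Docker", "Kubernetes",
--         "CI/CD", "GitHub Actions", "Git", "GitHub",
--         "GitLab", "Jenkins", "Terraform", "Linux",
--         "Nginx", "Apache",
--     ],
--     "ai": [
--         "Machine Learning", "Deep Learning",
--         "TensorFlow", "PyTorch", "Keras",
--         "Pandas", "NumPy", "Scikit-learn",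
--         "Matplotlib", "Seaborn", "Plotly",
--         "Data Visualization", "Data Analysis",
--         "NLP", "Computer Vision", "LLM",
--         "Gemini API", "OpenAI API", "LangChain",
--         "Hugging Face", "AIML", "Neural Networks",
--         "Collaborative Filtering", "Recommendation Systems",
--         "Object Detection", "Image Processing",
--     ],
--     "architecture": [
--         "MVC", "MVVM", "Microservices",
--         "System Design", "REST API", "GraphQL",
--         "Modular Architecture", "OOP",
--         "Object-Oriented Programming",
--         "Design Patterns", "SOLID Principles",
--     ],
--     "testing": [
--         "JUnit", "Mockito", "Selenium", "Cypress",
--         "Unit Testing", "XCTest", "Pytest",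
--         "Test-Driven Development", "TDD",
--     ],
--     "misc": [],
-- }
--
-- def bucket_skills(skills: list[str]) -> dict[str, list[str]]:
--     technical_skills: dict[str, list[str]] = {cat: [] for cat in TECH_SKILLS_DB}
--     technical_skills["misc"] = []
--     for skill in skills:
--         found_cat = None
--         for cat, kw_list in TECH_SKILLS_DB.items():
--             if any(s.lower() == skill.lower() for s in kw_list):
--                 found_cat = cat
--                 break
--         if found_cat:
--             technical_skills[found_cat].append(skill)  # pyre-ignore
--         else:
--             technical_skills["misc"].append(skill)  # pyre-ignore
--     return technical_skills
-- ===== SOURCE B (Python) =====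
-- # B: precomputed inverted index (lowercased keyword -> first owning category) replaces
-- # A's per-skill scan over every category's keyword list; classification is one dict lookup.
--
-- CATEGORIES = [
--     "languages", "web", "backend", "frontend", "mobile", "database",
--     "devops", "ai", "architecture", "testing", "misc",
-- ]
--
-- # keyword.lower() -> the FIRST category of TECH_SKILLS_DB that lists it
-- KEYWORD_TO_CAT: dict[str, str] = {
--     "python": "languages", "java": "languages", "kotlin": "languages",
--     "c++": "languages", "c#": "languages", "c": "languages",
--     "go": "languages", "rust": "languages", "swift": "languages",
--     "php": "languages", "ruby": "languages", "javascript": "languages",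
--     "typescript": "languages", "sql": "languages", "r": "languages",
--     "scala": "languages", "bash": "languages", "shell": "languages",
--     "matlab": "languages", "html": "web", "css": "web",
--     "tailwind": "web", "bootstrap": "web", "mern stack": "web",
--     "mean stack": "web", "lamp stack": "web", "rest api": "web",
--     "graphql": "web", "websockets": "web", "django": "backend",
--     "flask": "backend", "fastapi": "backend", "spring boot": "backend",
--     "express": "backend", "node.js": "backend", "laravel": "backend",
--     "asp.net": "backend", "gin": "backend", "echo": "backend",
--     "react": "frontend", "angular": "frontend", "vue": "frontend",
--     "next.js": "frontend", "redux": "frontend", "tailwind css": "frontend",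
--     "material ui": "frontend", "chakra ui": "frontend", "swiftui": "mobile",
--     "uikit": "mobile", "xcode": "mobile", "core data": "mobile",
--     "auto layout": "mobile", "storyboards": "mobile", "testflight": "mobile",
--     "app store connect": "mobile", "wkwebview": "mobile", "combine": "mobile",
--     "android": "mobile", "jetpack compose": "mobile", "retrofit": "mobile",
--     "flutter": "mobile", "react native": "mobile", "mysql": "database",
--     "postgresql": "database", "mongodb": "database", "sqlite": "database",
--     "firebase": "database", "redis": "database", "oracle": "database",
--     "mssql": "database", "cassandra": "database", "dynamodb": "database",
--     "supabase": "database", "sql querying": "database", "database management": "database",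
--     "aws": "devops", "azure": "devops", "gcp": "devops",
--     "docker": "devops", "kubernetes": "devops", "ci/cd": "devops",
--     "github actions": "devops", "git": "devops", "github": "devops",
--     "gitlab": "devops", "jenkins": "devops", "terraform": "devops",
--     "linux": "devops", "nginx": "devops", "apache": "devops",
--     "machine learning": "ai", "deep learning": "ai", "tensorflow": "ai",
--     "pytorch": "ai", "keras": "ai", "pandas": "ai",
--     "numpy": "ai", "scikit-learn": "ai", "matplotlib": "ai",
--     "seaborn": "ai", "plotly": "ai", "data visualization": "ai",
--     "data analysis": "ai", "nlp": "ai", "computer vision": "ai",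
--     "llm": "ai", "gemini api": "ai", "openai api": "ai",
--     "langchain": "ai", "hugging face": "ai", "aiml": "ai",
--     "neural networks": "ai", "collaborative filtering": "ai", "recommendation systems": "ai",
--     "object detection": "ai", "image processing": "ai", "mvc": "architecture",
--     "mvvm": "architecture", "microservices": "architecture", "system design": "architecture",
--     "modular architecture": "architecture", "oop": "architecture", "object-oriented programming": "architecture",
--     "design patterns": "architecture", "solid principles": "architecture", "junit": "testing",
--     "mockito": "testing", "selenium": "testing", "cypress": "testing",
--     "unit testing": "testing", "xctest": "testing", "pytest": "testing",
--     "test-driven development": "testing", "tdd": "testing",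
-- }
--
--
-- def bucket_skills(skills: list[str]) -> dict[str, list[str]]:
--     result: dict[str, list[str]] = {cat: [] for cat in CATEGORIES}
--     for skill in skills:
--         result[KEYWORD_TO_CAT.get(skill.lower(), "misc")].append(skill)
--     return result
-- ===== Notes on version B (the rewrite author's own statement) =====
-- stated objective: faster
-- what changed: Replaces A's per-skill scan over every category's keyword list with a precomputed inverted index (lowercased keyword -> first owning category), so each skill is classified by a single hashed dict lookup.
import Mathlib
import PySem

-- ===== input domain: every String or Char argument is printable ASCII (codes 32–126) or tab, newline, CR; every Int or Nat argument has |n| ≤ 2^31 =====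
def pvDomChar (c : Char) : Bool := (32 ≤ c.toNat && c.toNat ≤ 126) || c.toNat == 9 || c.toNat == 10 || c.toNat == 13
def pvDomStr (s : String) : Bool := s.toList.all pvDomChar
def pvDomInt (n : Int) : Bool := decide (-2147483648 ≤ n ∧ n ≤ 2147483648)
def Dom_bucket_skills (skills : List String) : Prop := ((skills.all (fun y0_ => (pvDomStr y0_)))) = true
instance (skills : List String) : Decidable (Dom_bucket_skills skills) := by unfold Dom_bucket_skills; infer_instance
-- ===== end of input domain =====

-- B replaces A's per-skill scan of every category's keyword list with a precomputed
-- inverted index (lowercased keyword -> first owning category): one lookup per skill.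


-- ===== PORT A =====
-- TECH_SKILLS_DB as an insertion-ordered association list (dict of str -> list[str])
def techSkillsDB : List (String × List String) := [
  ("languages", ["Python", "Java", "Kotlin", "C++", "C#", "C",
    "Go", "Rust", "Swift", "PHP", "Ruby",
    "JavaScript", "TypeScript", "SQL", "R", "Scala",
    "Bash", "Shell", "MATLAB"]),
  ("web", ["HTML", "CSS", "Tailwind", "Bootstrap",
    "MERN Stack", "MEAN Stack", "LAMP Stack",
    "REST API", "GraphQL", "WebSockets"]),
  ("backend", ["Django", "Flask", "FastAPI", "Spring Boot",
    "Express", "Node.js", "Laravel", "ASP.NET",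
    "FastAPI", "Gin", "Echo"]),
  ("frontend", ["React", "Angular", "Vue", "Next.js",
    "Redux", "Tailwind CSS", "Material UI", "Chakra UI"]),
  ("mobile", ["Swift", "SwiftUI", "UIKit", "Xcode", "Core Data",
    "Auto Layout", "Storyboards", "TestFlight",
    "App Store Connect", "WKWebView", "Combine",
    "Android", "Jetpack Compose", "Retrofit",
    "Flutter", "React Native"]),
  ("database", ["MySQL", "PostgreSQL", "MongoDB", "SQLite",
    "Firebase", "Redis", "Oracle", "MSSQL",
    "Cassandra", "DynamoDB", "Supabase",
    "SQL Querying", "Database Management"]),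
  ("devops", ["AWS", "Azure", "GCP", "Docker", "Kubernetes",
    "CI/CD", "GitHub Actions", "Git", "GitHub",
    "GitLab", "Jenkins", "Terraform", "Linux",
    "Nginx", "Apache"]),
  ("ai", ["Machine Learning", "Deep Learning",
    "TensorFlow", "PyTorch", "Keras",
    "Pandas", "NumPy", "Scikit-learn",
    "Matplotlib", "Seaborn", "Plotly",
    "Data Visualization", "Data Analysis",
    "NLP", "Computer Vision", "LLM",
    "Gemini API", "OpenAI API", "LangChain",
    "Hugging Face", "AIML", "Neural Networks",
    "Collaborative Filtering", "Recommendation Systems",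
    "Object Detection", "Image Processing"]),
  ("architecture", ["MVC", "MVVM", "Microservices",
    "System Design", "REST API", "GraphQL",
    "Modular Architecture", "OOP",
    "Object-Oriented Programming",
    "Design Patterns", "SOLID Principles"]),
  ("testing", ["JUnit", "Mockito", "Selenium", "Cypress",
    "Unit Testing", "XCTest", "Pytest",
    "Test-Driven Development", "TDD"]),
  ("misc", [])]

def bucket_skills (skills : List String) : List (String × List String) :=
  -- technical_skills = {cat: [] for cat in TECH_SKILLS_DB}; technical_skills["misc"] = []
  let init : PySem.Dict String (List String) :=
    techSkillsDB.foldl (fun d p => d.insert p.1 ([] : List String)) PySem.Dict.empty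
  let init := init.insert "misc" ([] : List String)
  -- for skill in skills: scan TECH_SKILLS_DB.items() for the first matching category
  (skills.foldl (fun d skill =>
    let found_cat : Option String :=
      techSkillsDB.findSome? (fun p =>
        if p.2.any (fun s => PySem.Str.lower s == PySem.Str.lower skill) then some p.1 else none)
    match found_cat with
    -- technical_skills[found_cat].append(skill): the key is always present, so
    -- dict[k].append(x) is modify k with append (the [] default is never used)
    | some cat => d.modify cat ([] : List String) (fun l => l ++ [skill])
    | none     => d.modify "misc" ([] : List String) (fun l => l ++ [skill])) init).items

-- ===== PORT B =====
-- CATEGORIES of Source B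
def pvCategories : List String :=
  ["languages", "web", "backend", "frontend", "mobile", "database",
   "devops", "ai", "architecture", "testing", "misc"]

-- KEYWORD_TO_CAT of Source B: a dict literal with unique keys (comments mark categories)
def pvKwToCat : PySem.Dict String String := PySem.Dict.mk [
  ("python", "languages"), ("java", "languages"), ("kotlin", "languages"),
  ("c++", "languages"), ("c#", "languages"), ("c", "languages"),
  ("go", "languages"), ("rust", "languages"), ("swift", "languages"),
  ("php", "languages"), ("ruby", "languages"), ("javascript", "languages"),
  ("typescript", "languages"), ("sql", "languages"), ("r", "languages"),
  ("scala", "languages"), ("bash", "languages"), ("shell", "languages"),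
  ("matlab", "languages"), ("html", "web"), ("css", "web"),
  ("tailwind", "web"), ("bootstrap", "web"), ("mern stack", "web"),
  ("mean stack", "web"), ("lamp stack", "web"), ("rest api", "web"),
  ("graphql", "web"), ("websockets", "web"), ("django", "backend"),
  ("flask", "backend"), ("fastapi", "backend"), ("spring boot", "backend"),
  ("express", "backend"), ("node.js", "backend"), ("laravel", "backend"),
  ("asp.net", "backend"), ("gin", "backend"), ("echo", "backend"),
  ("react", "frontend"), ("angular", "frontend"), ("vue", "frontend"),
  ("next.js", "frontend"), ("redux", "frontend"), ("tailwind css", "frontend"),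
  ("material ui", "frontend"), ("chakra ui", "frontend"), ("swiftui", "mobile"),
  ("uikit", "mobile"), ("xcode", "mobile"), ("core data", "mobile"),
  ("auto layout", "mobile"), ("storyboards", "mobile"), ("testflight", "mobile"),
  ("app store connect", "mobile"), ("wkwebview", "mobile"), ("combine", "mobile"),
  ("android", "mobile"), ("jetpack compose", "mobile"), ("retrofit", "mobile"),
  ("flutter", "mobile"), ("react native", "mobile"), ("mysql", "database"),
  ("postgresql", "database"), ("mongodb", "database"), ("sqlite", "database"),
  ("firebase", "database"), ("redis", "database"), ("oracle", "database"),
  ("mssql", "database"), ("cassandra", "database"), ("dynamodb", "database"),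
  ("supabase", "database"), ("sql querying", "database"), ("database management", "database"),
  ("aws", "devops"), ("azure", "devops"), ("gcp", "devops"),
  ("docker", "devops"), ("kubernetes", "devops"), ("ci/cd", "devops"),
  ("github actions", "devops"), ("git", "devops"), ("github", "devops"),
  ("gitlab", "devops"), ("jenkins", "devops"), ("terraform", "devops"),
  ("linux", "devops"), ("nginx", "devops"), ("apache", "devops"),
  ("machine learning", "ai"), ("deep learning", "ai"), ("tensorflow", "ai"),
  ("pytorch", "ai"), ("keras", "ai"), ("pandas", "ai"),
  ("numpy", "ai"), ("scikit-learn", "ai"), ("matplotlib", "ai"),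
  ("seaborn", "ai"), ("plotly", "ai"), ("data visualization", "ai"),
  ("data analysis", "ai"), ("nlp", "ai"), ("computer vision", "ai"),
  ("llm", "ai"), ("gemini api", "ai"), ("openai api", "ai"),
  ("langchain", "ai"), ("hugging face", "ai"), ("aiml", "ai"),
  ("neural networks", "ai"), ("collaborative filtering", "ai"), ("recommendation systems", "ai"),
  ("object detection", "ai"), ("image processing", "ai"), ("mvc", "architecture"),
  ("mvvm", "architecture"), ("microservices", "architecture"), ("system design", "architecture"),
  ("modular architecture", "architecture"), ("oop", "architecture"), ("object-oriented programming", "architecture"),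
  ("design patterns", "architecture"), ("solid principles", "architecture"), ("junit", "testing"),
  ("mockito", "testing"), ("selenium", "testing"), ("cypress", "testing"),
  ("unit testing", "testing"), ("xctest", "testing"), ("pytest", "testing"),
  ("test-driven development", "testing"), ("tdd", "testing")]

def bucket_skills_alt (skills : List String) : List (String × List String) :=
  -- result = {cat: [] for cat in CATEGORIES}
  let init : PySem.Dict String (List String) :=
    pvCategories.foldl (fun d c => d.insert c ([] : List String)) PySem.Dict.empty
  -- for skill in skills: result[KEYWORD_TO_CAT.get(skill.lower(), "misc")].append(skill)
  (skills.foldl (fun d skill =>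
    d.modify (pvKwToCat.getD (PySem.Str.lower skill) "misc") ([] : List String)
      (fun l => l ++ [skill])) init).items

-- ===== PRECONDITION & SPEC =====
def Spec_bucket_skills (skills : List String) (out : List (String × List String)) : Prop := out = bucket_skills_alt skills
instance (skills : List String) (out : List (String × List String)) : Decidable (Spec_bucket_skills skills out) := by unfold Spec_bucket_skills; infer_instance

-- ===== CLAIM (what is proved, stated in full; the proofs are below) =====
def Claim_equal_bucket_skills : Prop := ∀ (skills : List String), Dom_bucket_skills skills → Spec_bucket_skills skills (bucket_skills skills)

-- ===== LEMMAS AND PROOFS =====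

-- first matching category (case-insensitive) among the entries of db: A's inner scan
def pvClassifyDB (db : List (String × List String)) (s : String) : Option String :=
  db.findSome? (fun p => if p.2.any (fun kw => PySem.Str.lower kw == PySem.Str.lower s) then some p.1 else none)

-- the category A assigns to a skill
def pvCat (s : String) : String := (pvClassifyDB techSkillsDB s).getD "misc"

-- first-match scan of an association list (what Dict.get? does on a literal dict)
def pvScan : List (String × String) → String → Option String
  | [], _ => none
  | p :: rest, t => if p.1 == t then some p.2 else pvScan rest t

-- keep the FIRST entry for each key, dropping keys already in `seen`
def pvDedup (seen : List String) : List (String × String) → List (String × String)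
  | [] => []
  | p :: rest => if seen.contains p.1 then pvDedup seen rest
                 else p :: pvDedup (p.1 :: seen) rest

-- the raw (duplicated) inverted index of a DB
def pvFlat (db : List (String × List String)) : List (String × String) :=
  db.flatMap (fun p => p.2.map (fun kw => (PySem.Str.lower kw, p.1)))

lemma pvGet_mk (l : List (String × String)) (t : String) :
    (PySem.Dict.mk l).get? t = pvScan l t := by
  induction l with
  | nil => rfl
  | cons p rest ih =>
    rw [PySem.Dict.get?_mk_cons, pvScan]
    by_cases h : p.1 == t
    · rw [if_pos h, if_pos h]
    · rw [if_neg h, if_neg h, ih]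

lemma pvScan_dedup (seen : List String) (l : List (String × String)) (t : String)
    (ht : seen.contains t = false) :
    pvScan (pvDedup seen l) t = pvScan l t := by
  induction l generalizing seen with
  | nil => rfl
  | cons p rest ih =>
    rw [pvDedup]
    by_cases hs : seen.contains p.1 = true
    · rw [if_pos hs, pvScan]
      have hne : (p.1 == t) = false := by
        simp only [beq_eq_false_iff_ne, ne_eq]
        rintro rfl
        rw [hs] at ht
        exact Bool.noConfusion ht
      rw [hne, if_neg (by simp), ih seen ht]
    · rw [if_neg hs, pvScan, pvScan]
      by_cases he : p.1 == t
      · rw [if_pos he, if_pos he]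
      · rw [if_neg he, if_neg he]
        apply ih
        simp only [List.contains_cons, Bool.or_eq_false_iff]
        exact ⟨by simpa [eq_comm, beq_eq_decide] using he, ht⟩

lemma pvScan_map_append (kws : List String) (c : String) (rest : List (String × String)) (s : String) :
    pvScan (kws.map (fun kw => (PySem.Str.lower kw, c)) ++ rest) (PySem.Str.lower s)
      = if kws.any (fun kw => PySem.Str.lower kw == PySem.Str.lower s) then some c
        else pvScan rest (PySem.Str.lower s) := by
  induction kws with
  | nil => simp
  | cons kw t ih =>
    rw [List.map_cons, List.cons_append, pvScan, List.any_cons]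
    by_cases h : PySem.Str.lower kw == PySem.Str.lower s
    · rw [if_pos h]; simp [h]
    · rw [if_neg h, ih]; simp [h]

lemma pvScan_flat (db : List (String × List String)) (s : String) :
    pvScan (pvFlat db) (PySem.Str.lower s) = pvClassifyDB db s := by
  induction db with
  | nil => rfl
  | cons p rest ih =>
    rw [show pvFlat (p :: rest)
          = p.2.map (fun kw => (PySem.Str.lower kw, p.1)) ++ pvFlat rest from rfl,
      pvScan_map_append]
    unfold pvClassifyDB
    rw [List.findSome?_cons]
    by_cases h : p.2.any (fun kw => PySem.Str.lower kw == PySem.Str.lower s)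
    · rw [if_pos h, if_pos (by simp [h])]
    · rw [if_neg h, if_neg (by simp [h])]
      exact ih

-- the literal table IS the deduplicated inverted index of TECH_SKILLS_DB
set_option maxRecDepth 40000 in
lemma pvTable_eq : pvKwToCat = PySem.Dict.mk (pvDedup [] (pvFlat techSkillsDB)) := by decide

-- pointwise: B's table lookup computes exactly A's first-matching-category scan
lemma pvCat_eq (s : String) : pvKwToCat.getD (PySem.Str.lower s) "misc" = pvCat s := by
  rw [PySem.Dict.getD_eq_get?_getD, pvTable_eq, pvGet_mk,
    pvScan_dedup [] _ _ rfl, pvScan_flat]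
  rfl

-- the two initial dicts (A: DB keys then re-insert "misc"; B: CATEGORIES) are equal
set_option maxRecDepth 40000 in
lemma pvInit_eq :
    (techSkillsDB.foldl (fun (d : PySem.Dict String (List String)) p =>
        d.insert p.1 ([] : List String)) PySem.Dict.empty).insert "misc" ([] : List String)
      = pvCategories.foldl (fun (d : PySem.Dict String (List String)) c =>
        d.insert c ([] : List String)) PySem.Dict.empty := by decide

-- ===== VERDICT (by name: the statement is the Claim_ definition above) =====
theorem bucket_skills_spec : Claim_equal_bucket_skills := by
  intro skills _
  show (skills.foldl (fun (d : PySem.Dict String (List String)) skill =>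
      match techSkillsDB.findSome? (fun p =>
        if p.2.any (fun s => PySem.Str.lower s == PySem.Str.lower skill) then some p.1 else none) with
      | some cat => d.modify cat ([] : List String) (fun l => l ++ [skill])
      | none     => d.modify "misc" ([] : List String) (fun l => l ++ [skill]))
      ((techSkillsDB.foldl (fun d p => d.insert p.1 ([] : List String)) PySem.Dict.empty).insert
        "misc" ([] : List String))).items
    = (skills.foldl (fun (d : PySem.Dict String (List String)) skill =>
      d.modify (pvKwToCat.getD (PySem.Str.lower skill) "misc") ([] : List String)
        (fun l => l ++ [skill]))
      (pvCategories.foldl (fun d c => d.insert c ([] : List String)) PySem.Dict.empty)).items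
  rw [pvInit_eq]
  congr 1
  apply PySem.List.foldl_congr_mem
  intro d skill _
  rw [show (techSkillsDB.findSome? (fun p =>
      if p.2.any (fun s => PySem.Str.lower s == PySem.Str.lower skill) then some p.1 else none))
      = pvClassifyDB techSkillsDB skill from rfl, pvCat_eq skill]
  cases h : pvClassifyDB techSkillsDB skill with
  | none => simp [pvCat, h]
  | some c => simp [pvCat, h]
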